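-- pv_equiv track=rewrite | github.com/pypi-data/pypi-mirror-392 | packages/tree-sitter-analyzer/tree_sitter_analyzer-1.9.15.tar.gz/tree_sitter_analyzer-1.9.15/tree_sitter_analyzer/languages/sql_plugin.py | _split_column_definitions
-- ===== SOURCE A (Python) =====
-- def _split_column_definitions(content: str) -> list[str]:
--     """Split column definitions by commas, handling nested parentheses."""
--     definitions = []
--     current_def = ""
--     paren_count = 0
--
--     for char in content:
--         if char == "(":
--             paren_count += 1
--         elif char == ")":
--             paren_count -= 1
--         elif char == "," and paren_count == 0:
--             if current_def.strip():
--                 definitions.append(current_def.strip())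
--             current_def = ""
--             continue
--
--         current_def += char
--
--     if current_def.strip():
--         definitions.append(current_def.strip())
--
--     return definitions
-- ===== SOURCE B (Python) =====
-- def _split_column_definitions(content: str) -> list[str]:
--     """Index-table version: record top-level comma positions, then slice."""
--     cuts = []
--     depth = 0
--     for i, ch in enumerate(content):
--         if ch == "(":
--             depth += 1
--         elif ch == ")":
--             depth -= 1
--         elif ch == "," and depth == 0:
--             cuts.append(i)
--     parts = []
--     start = 0
--     for i in cuts + [len(content)]:
--         seg = content[start:i].strip()
--         if seg:
--             parts.append(seg)
--         start = i + 1
--     return parts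
-- ===== Notes on version B (the rewrite author's own statement) =====
-- stated objective: alternative
-- what changed: Replaces the accumulate-into-current_def loop with a first pass that records the indices of top-level commas and a second pass that slices the string at those cut points, strips each slice and keeps the non-empty ones.
import Mathlib
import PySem

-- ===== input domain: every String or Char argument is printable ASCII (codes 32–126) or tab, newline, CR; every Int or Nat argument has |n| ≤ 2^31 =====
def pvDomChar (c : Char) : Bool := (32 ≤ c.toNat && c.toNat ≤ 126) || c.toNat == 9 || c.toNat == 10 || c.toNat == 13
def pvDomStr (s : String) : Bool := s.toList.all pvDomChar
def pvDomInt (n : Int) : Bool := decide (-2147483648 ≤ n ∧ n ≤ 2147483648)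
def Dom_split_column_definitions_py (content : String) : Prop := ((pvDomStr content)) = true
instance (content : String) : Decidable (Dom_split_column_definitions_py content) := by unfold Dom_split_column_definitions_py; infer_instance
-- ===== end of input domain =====

-- B replaces A's accumulate-into-current_def loop by an index table of top-level
-- commas followed by a slicing pass (alternative decomposition, same cost).

-- ===== PORT A =====
-- loop state: (definitions, current_def, paren_count)
def pvStepA (st : List (List Char) × List Char × Int) (c : Char) :
    List (List Char) × List Char × Int :=
  let (defs, cur, d) := st
  if c = '(' then (defs, cur ++ [c], d + 1)
  else if c = ')' then (defs, cur ++ [c], d - 1)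
  else if c = ',' ∧ d = 0 then
    (if PySem.Chars.strip cur ≠ [] then defs ++ [PySem.Chars.strip cur] else defs, [], d)
  else (defs, cur ++ [c], d)

def split_column_definitions_py (content : String) : List String :=
  let st := content.toList.foldl pvStepA ([], [], 0)
  let defs := if PySem.Chars.strip st.2.1 ≠ [] then st.1 ++ [PySem.Chars.strip st.2.1] else st.1
  defs.map String.ofList

-- ===== PORT B =====
-- first pass state: (index, depth, cut indices)
def pvStepCuts (st : Nat × Int × List Nat) (c : Char) : Nat × Int × List Nat :=
  let (i, d, cuts) := st
  if c = '(' then (i + 1, d + 1, cuts)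
  else if c = ')' then (i + 1, d - 1, cuts)
  else if c = ',' ∧ d = 0 then (i + 1, d, cuts ++ [i])
  else (i + 1, d, cuts)

-- second pass state: (parts, start); content[start:i].strip() with 0 ≤ start ≤ i
-- is exactly (drop start).take (i - start)
def pvStepSlice (cs : List Char) (st : List (List Char) × Nat) (i : Nat) :
    List (List Char) × Nat :=
  let (parts, start) := st
  let seg := PySem.Chars.strip ((cs.drop start).take (i - start))
  (if seg ≠ [] then parts ++ [seg] else parts, i + 1)

def split_column_definitions_py_alt (content : String) : List String :=
  let cs := content.toList
  let cuts := (cs.foldl pvStepCuts (0, 0, [])).2.2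
  let parts := ((cuts ++ [cs.length]).foldl (pvStepSlice cs) ([], 0)).1
  parts.map String.ofList

-- ===== PRECONDITION & SPEC =====
def Spec_split_column_definitions_py (content : String) (out : List String) : Prop := out = split_column_definitions_py_alt content
instance (content : String) (out : List String) : Decidable (Spec_split_column_definitions_py content out) := by unfold Spec_split_column_definitions_py; infer_instance

-- ===== CLAIM (what is proved, stated in full; the proofs are below) =====
def Claim_equal_split_column_definitions_py : Prop := ∀ (content : String), Dom_split_column_definitions_py content → Spec_split_column_definitions_py content (split_column_definitions_py content)

-- ===== LEMMAS AND PROOFS =====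

/-- Depth update on one character. -/
def pvD (c : Char) (d : Int) : Int :=
  if c = '(' then d + 1 else if c = ')' then d - 1 else d

/-- Common spec: the raw top-level segments of `cs` starting at depth `d`
(top-level commas removed, all other chars kept). Always nonempty. -/
def pvSplitTop (cs : List Char) (d : Int) : List (List Char) :=
  match cs with
  | [] => [[]]
  | c :: cs =>
    if c = ',' ∧ d = 0 then [] :: pvSplitTop cs d
    else
      match pvSplitTop cs (pvD c d) with
      | [] => [[c]]
      | s :: r => (c :: s) :: r

/-- Prepend a pending prefix onto the first segment. -/
def pvAttach (pre : List Char) : List (List Char) → List (List Char)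
  | [] => [pre]
  | s :: r => (pre ++ s) :: r

/-- Strip each segment and keep the nonempty results. -/
def pvEmit (segs : List (List Char)) : List (List Char) :=
  segs.filterMap (fun s =>
    if PySem.Chars.strip s ≠ [] then some (PySem.Chars.strip s) else none)

theorem pvSplitTop_ne_nil (cs : List Char) (d : Int) : pvSplitTop cs d ≠ [] := by
  cases cs with
  | nil => simp [pvSplitTop]
  | cons c cs =>
    simp only [pvSplitTop]
    split
    · simp
    · split <;> simp

theorem pvAttach_nil (segs : List (List Char)) (h : segs ≠ []) :
    pvAttach [] segs = segs := by
  cases segs with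
  | nil => exact absurd rfl h
  | cons s r => simp [pvAttach]

theorem pvAttach_attach (a b : List Char) (segs : List (List Char)) :
    pvAttach a (pvAttach b segs) = pvAttach (a ++ b) segs := by
  cases segs <;> simp [pvAttach]

theorem pvEmit_cons (s : List Char) (r : List (List Char)) :
    pvEmit (s :: r) =
      (if PySem.Chars.strip s ≠ [] then [PySem.Chars.strip s] else []) ++ pvEmit r := by
  simp only [pvEmit, List.filterMap_cons]
  by_cases h : PySem.Chars.strip s = [] <;> simp [h]

theorem pvSplitTop_cons_comma (rest : List Char) : pvSplitTop (',' :: rest) 0 = [] :: pvSplitTop rest 0 := by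
  simp [pvSplitTop]

theorem pvSplitTop_cons_other (c : Char) (rest : List Char) (d : Int)
    (hc : ¬(c = ',' ∧ d = 0)) :
    pvSplitTop (c :: rest) d = pvAttach [c] (pvSplitTop rest (pvD c d)) := by
  simp only [pvSplitTop, if_neg hc]
  cases h : pvSplitTop rest (pvD c d) <;> simp [pvAttach]

theorem pvStepA_comma (defs : List (List Char)) (cur : List Char) :
    pvStepA (defs, cur, 0) ',' =
      (if PySem.Chars.strip cur ≠ [] then defs ++ [PySem.Chars.strip cur] else defs, [], 0) := by
  simp [pvStepA]

theorem pvStepA_other (defs : List (List Char)) (cur : List Char) (d : Int) (c : Char)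
    (hc : ¬(c = ',' ∧ d = 0)) :
    pvStepA (defs, cur, d) c = (defs, cur ++ [c], pvD c d) := by
  by_cases hp : c = '('
  · simp [pvStepA, pvD, hp]
  · by_cases hq : c = ')'
    · simp [pvStepA, pvD, hq]
    · simp [pvStepA, pvD, hp, hq, hc]

/-- A's loop, characterised against the common spec. -/
theorem pvLemA (cs : List Char) : ∀ (defs : List (List Char)) (cur : List Char) (d : Int),
    (if PySem.Chars.strip (cs.foldl pvStepA (defs, cur, d)).2.1 ≠ [] then
        (cs.foldl pvStepA (defs, cur, d)).1 ++
          [PySem.Chars.strip (cs.foldl pvStepA (defs, cur, d)).2.1]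
      else (cs.foldl pvStepA (defs, cur, d)).1)
    = defs ++ pvEmit (pvAttach cur (pvSplitTop cs d)) := by
  induction cs with
  | nil =>
    intro defs cur d
    simp only [List.foldl_nil, pvSplitTop, pvAttach, List.append_nil, pvEmit_cons]
    simp only [pvEmit, List.filterMap_nil, List.append_nil]
    split <;> simp
  | cons c cs ih =>
    intro defs cur d
    by_cases hc : c = ',' ∧ d = 0
    · obtain ⟨rfl, rfl⟩ := hc
      rw [List.foldl_cons, pvStepA_comma, ih, pvSplitTop_cons_comma]
      have hne := pvSplitTop_ne_nil cs 0
      cases hseg : pvSplitTop cs 0 with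
      | nil => exact absurd hseg hne
      | cons s r =>
        simp only [pvAttach, pvEmit_cons, List.append_nil, List.nil_append]
        split <;> simp
    · rw [List.foldl_cons, pvStepA_other defs cur d c hc, ih,
        pvSplitTop_cons_other c cs d hc, pvAttach_attach]

/-- Absolute indices of the top-level commas of `cs`, scanning from position `i` at depth `d`. -/
def pvCuts (cs : List Char) (i : Nat) (d : Int) : List Nat :=
  match cs with
  | [] => []
  | c :: cs =>
    if c = ',' ∧ d = 0 then i :: pvCuts cs (i + 1) d
    else pvCuts cs (i + 1) (pvD c d)

theorem pvStepCuts_eq (i : Nat) (d : Int) (acc : List Nat) (c : Char) :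
    pvStepCuts (i, d, acc) c =
      (i + 1, pvD c d, if c = ',' ∧ d = 0 then acc ++ [i] else acc) := by
  by_cases hp : c = '('
  · simp [pvStepCuts, pvD, hp]
  · by_cases hq : c = ')'
    · simp [pvStepCuts, pvD, hq]
    · by_cases hc : c = ',' ∧ d = 0 <;> simp [pvStepCuts, pvD, hp, hq, hc]

theorem pvLemCuts (cs : List Char) : ∀ (i : Nat) (d : Int) (acc : List Nat),
    (cs.foldl pvStepCuts (i, d, acc)).2.2 = acc ++ pvCuts cs i d := by
  induction cs with
  | nil => intro i d acc; simp [pvCuts]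
  | cons c cs ih =>
    intro i d acc
    rw [List.foldl_cons, pvStepCuts_eq, ih]
    by_cases hc : c = ',' ∧ d = 0
    · obtain ⟨rfl, rfl⟩ := hc
      simp [pvCuts, pvD]
    · simp [pvCuts, hc]

/-- B's slicing pass, characterised against the common spec.  `s` is the start of
the pending segment, `p` the scan position; `cs.drop p` is the unscanned suffix. -/
theorem pvLemB (cs : List Char) (n : Nat) :
    ∀ (s p : Nat) (d : Int) (parts : List (List Char)),
    n = cs.length - p → s ≤ p → p ≤ cs.length →
    ((pvCuts (cs.drop p) p d ++ [cs.length]).foldl (pvStepSlice cs) (parts, s)).1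
    = parts ++ pvEmit (pvAttach ((cs.drop s).take (p - s)) (pvSplitTop (cs.drop p) d)) := by
  induction n with
  | zero =>
    intro s p d parts hn hsp hp
    have hpl : p = cs.length := by omega
    subst hpl
    simp only [List.drop_length, pvCuts, pvSplitTop, List.nil_append, List.foldl_cons,
      List.foldl_nil, pvStepSlice, pvAttach, List.append_nil, pvEmit_cons]
    have htake : (cs.drop s).take (cs.length - s) = cs.drop s := by
      apply List.take_of_length_le; simp
    rw [htake]
    simp only [pvEmit, List.filterMap_nil, List.append_nil]
    split <;> simp
  | succ n ih =>
    intro s p d parts hn hsp hp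
    have hplt : p < cs.length := by omega
    have hdrop : cs.drop p = cs[p] :: cs.drop (p + 1) := List.drop_eq_getElem_cons hplt
    rw [hdrop]
    by_cases hc : cs[p] = ',' ∧ d = 0
    · obtain ⟨hcomma, rfl⟩ := hc
      rw [show pvCuts (cs[p] :: cs.drop (p+1)) p 0 = p :: pvCuts (cs.drop (p+1)) (p+1) 0 by
        simp [pvCuts, hcomma]]
      rw [List.cons_append, List.foldl_cons]
      have hstep : pvStepSlice cs (parts, s) p =
          (if PySem.Chars.strip ((cs.drop s).take (p - s)) ≠ [] then
              parts ++ [PySem.Chars.strip ((cs.drop s).take (p - s))] else parts, p + 1) := by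
        simp [pvStepSlice]
      rw [hstep, ih (p+1) (p+1) 0 _ (by omega) le_rfl (by omega)]
      have hne := pvSplitTop_ne_nil (cs.drop (p+1)) 0
      rw [show (p+1) - (p+1) = 0 by omega]
      simp only [List.take_zero, pvAttach_nil _ hne]
      rw [hcomma, pvSplitTop_cons_comma]
      cases hseg : pvSplitTop (cs.drop (p+1)) 0 with
      | nil => exact absurd hseg hne
      | cons t r =>
        simp only [pvAttach, List.append_nil, pvEmit_cons]
        split <;> simp
    · rw [show pvCuts (cs[p] :: cs.drop (p+1)) p d = pvCuts (cs.drop (p+1)) (p+1) (pvD cs[p] d) by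
        simp [pvCuts, hc]]
      rw [ih s (p+1) (pvD cs[p] d) parts (by omega) (by omega) (by omega)]
      have htake : (cs.drop s).take (p + 1 - s) = (cs.drop s).take (p - s) ++ [cs[p]] := by
        rw [show p + 1 - s = (p - s) + 1 by omega, List.take_add_one]
        have : (cs.drop s)[p - s]? = some cs[p] := by
          rw [List.getElem?_drop, show s + (p - s) = p by omega]
          exact List.getElem?_eq_getElem hplt
        rw [this]
        rfl
      rw [htake, pvSplitTop_cons_other _ _ _ hc, pvAttach_attach]

-- ===== VERDICT (by name: the statement is the Claim_ definition above) =====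
theorem split_column_definitions_py_spec : Claim_equal_split_column_definitions_py := by
  intro content _
  unfold Spec_split_column_definitions_py split_column_definitions_py split_column_definitions_py_alt
  simp only
  rw [pvLemA, pvLemCuts]
  rw [show ((0:Nat), (0:Int), ([]:List Nat)).2.2 ++ pvCuts content.toList 0 0
      = pvCuts (content.toList.drop 0) 0 0 by simp]
  rw [pvLemB content.toList content.toList.length 0 0 0 [] (by omega) le_rfl (by omega)]
  simp [pvAttach_nil _ (pvSplitTop_ne_nil _ _)]
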